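-- pv_equiv track=rewrite | github.com/BaitingLuo/Dynamic_Simplex | ANTI-CARLA/leaderboard/team_code/image_agent_working.py | search
-- ===== SOURCE A (Python) =====
-- def search(entry,X_train):
--     match = []
--     weather = []
--     driving_score = []
--     for val in X_train:
--         if entry[0] == val[0] and entry[1] == val[1] and entry[2] == val[2] and entry[3] == val[3]:
--             match.append(val)
--             weather.append([val[4],val[5],val[6],val[7]])
--             driving_score.append([val[8],val[9]])
--
--
--     return match,weather,driving_score
-- ===== SOURCE B (Python) =====
-- def search(entry, X_train):
--     # Build a hash index: group every row by its first-four-field key,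
--     # then answer with a single dict lookup.
--     groups = {}
--     for val in X_train:
--         groups.setdefault(tuple(val[:4]), []).append(val)
--     m = groups.get(tuple(entry[:4]), [])
--     weather = [v[4:8] for v in m]
--     driving_score = [v[8:10] for v in m]
--     return m, weather, driving_score
-- ===== Notes on version B (the rewrite author's own statement) =====
-- stated objective: alternative
-- what changed: Replaces the fused filter loop (four indexed comparisons per row with three appends) by a grouping hash index: one pass buckets every row under its tuple(val[:4]) key, the answer is a single dict lookup on tuple(entry[:4]), and the two projections map over the looked-up bucket; Pre_ excludes exactly the inputs where A raises IndexError on a short row.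
import Mathlib
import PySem

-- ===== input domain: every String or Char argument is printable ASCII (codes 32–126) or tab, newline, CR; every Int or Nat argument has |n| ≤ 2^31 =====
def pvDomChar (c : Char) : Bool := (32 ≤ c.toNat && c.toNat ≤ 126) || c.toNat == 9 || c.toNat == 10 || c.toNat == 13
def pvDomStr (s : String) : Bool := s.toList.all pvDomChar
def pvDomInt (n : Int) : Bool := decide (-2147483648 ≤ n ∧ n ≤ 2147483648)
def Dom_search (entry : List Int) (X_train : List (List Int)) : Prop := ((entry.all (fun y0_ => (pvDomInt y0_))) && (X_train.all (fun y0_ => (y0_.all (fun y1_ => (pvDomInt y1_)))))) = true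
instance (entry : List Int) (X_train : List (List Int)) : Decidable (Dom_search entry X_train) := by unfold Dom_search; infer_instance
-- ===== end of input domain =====

-- B replaces A's fused four-comparison filter loop by a grouping hash index: one pass
-- buckets every row by its first-four-field key, the answer is one dict lookup.

-- ===== PORT A =====
-- l.getD i 0 ports the nonnegative-literal index l[i]; exact whenever the index is in
-- range, which Pre_search guarantees at every access A performs.
def search (entry : List Int) (X_train : List (List Int)) : List (List Int) × List (List Int) × List (List Int) :=
  X_train.foldl (fun acc val =>
    if entry.getD 0 0 = val.getD 0 0 ∧ entry.getD 1 0 = val.getD 1 0 ∧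
       entry.getD 2 0 = val.getD 2 0 ∧ entry.getD 3 0 = val.getD 3 0 then
      (acc.1 ++ [val],
       acc.2.1 ++ [[val.getD 4 0, val.getD 5 0, val.getD 6 0, val.getD 7 0]],
       acc.2.2 ++ [[val.getD 8 0, val.getD 9 0]])
    else acc) ([], [], [])

-- ===== PORT B =====
-- Python's tuple(val[:4]) key is ported as the List Int slice itself (same equality).
-- groups.setdefault(k, []).append(val) is d.modify k [] (· ++ [val]).
def search_alt (entry : List Int) (X_train : List (List Int)) : List (List Int) × List (List Int) × List (List Int) :=
  let groups := X_train.foldl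
    (fun d val => d.modify (PySem.List.slice val (some 0) (some 4)) [] (· ++ [val]))
    PySem.Dict.empty
  let m := groups.getD (PySem.List.slice entry (some 0) (some 4)) []
  (m, m.map (fun v => PySem.List.slice v (some 4) (some 8)),
      m.map (fun v => PySem.List.slice v (some 8) (some 10)))

-- ===== PRECONDITION & SPEC =====
-- rowOK states exactly the index accesses A performs on one row (short-circuit order):
-- entry[0]/val[0] always, each later pair only if the previous ones were equal, and
-- val[8], val[9] only on a full match.  Pre_search excludes exactly the inputs where A
-- raises IndexError.
def rowOK (e v : List Int) : Prop :=
  0 < e.length ∧ 0 < v.length ∧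
  (e.getD 0 0 = v.getD 0 0 → 1 < e.length ∧ 1 < v.length ∧
  (e.getD 1 0 = v.getD 1 0 → 2 < e.length ∧ 2 < v.length ∧
  (e.getD 2 0 = v.getD 2 0 → 3 < e.length ∧ 3 < v.length ∧
  (e.getD 3 0 = v.getD 3 0 → 10 ≤ v.length))))

def Pre_search (entry : List Int) (X_train : List (List Int)) : Prop :=
  ∀ v ∈ X_train, rowOK entry v

instance (entry : List Int) (X_train : List (List Int)) : Decidable (Pre_search entry X_train) := by
  unfold Pre_search rowOK; infer_instance

def pvWitness_search : List Int × List (List Int) :=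
  ([1, 2, 3, 4], [[1, 2, 3, 4, 5, 6, 7, 8, 9, 10], [0, 2, 3, 4]])

def Spec_search (entry : List Int) (X_train : List (List Int)) (out : List (List Int) × List (List Int) × List (List Int)) : Prop := out = search_alt entry X_train
instance (entry : List Int) (X_train : List (List Int)) (out : List (List Int) × List (List Int) × List (List Int)) : Decidable (Spec_search entry X_train out) := by unfold Spec_search; infer_instance

-- ===== CLAIM (what is proved, stated in full; the proofs are below) =====
def Claim_equal_search : Prop := ∀ (entry : List Int) (X_train : List (List Int)), Dom_search entry X_train → Pre_search entry X_train → Spec_search entry X_train (search entry X_train)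

-- ===== LEMMAS AND PROOFS =====

lemma sl04_eq_take (xs : List Int) : PySem.List.slice xs (some 0) (some 4) = xs.take 4 := by
  rw [PySem.List.slice_zero_start, PySem.List.slice_to xs (by norm_num : (0:Int) ≤ 4)]
  rfl

lemma sl48_eq (xs : List Int) : PySem.List.slice xs (some 4) (some 8) = (xs.drop 4).take 4 := by
  rw [PySem.List.slice_toNat xs (by norm_num : (0:Int) ≤ 4) (by norm_num : (0:Int) ≤ 8)]
  rfl

lemma sl810_eq (xs : List Int) : PySem.List.slice xs (some 8) (some 10) = (xs.drop 8).take 2 := by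
  rw [PySem.List.slice_toNat xs (by norm_num : (0:Int) ≤ 8) (by norm_num : (0:Int) ≤ 10)]
  rfl

-- On a row A fully matches, the slice key agrees and the two extracted slices are the
-- element lists A builds.
lemma row_match (e v : List Int) (h : rowOK e v)
    (h0 : e.getD 0 0 = v.getD 0 0) (h1 : e.getD 1 0 = v.getD 1 0)
    (h2 : e.getD 2 0 = v.getD 2 0) (h3 : e.getD 3 0 = v.getD 3 0) :
    PySem.List.slice v (some 0) (some 4) = PySem.List.slice e (some 0) (some 4)
    ∧ PySem.List.slice v (some 4) (some 8) = [v.getD 4 0, v.getD 5 0, v.getD 6 0, v.getD 7 0]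
    ∧ PySem.List.slice v (some 8) (some 10) = [v.getD 8 0, v.getD 9 0] := by
  obtain ⟨-, -, h⟩ := h
  obtain ⟨-, -, h⟩ := h h0
  obtain ⟨-, -, h⟩ := h h1
  obtain ⟨he, hv, h⟩ := h h2
  have hv10 := h h3
  rw [sl04_eq_take, sl04_eq_take, sl48_eq, sl810_eq]
  match e, v, he, hv10 with
  | e0::e1::e2::e3::er, v0::v1::v2::v3::v4::v5::v6::v7::v8::v9::vr, _, _ =>
    simp [List.getD] at h0 h1 h2 h3 ⊢
    exact ⟨h0.symm, h1.symm, h2.symm, h3.symm⟩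

-- On a row A rejects, the slice keys differ.
lemma row_nomatch (e v : List Int) (h : rowOK e v)
    (hn : ¬(e.getD 0 0 = v.getD 0 0 ∧ e.getD 1 0 = v.getD 1 0 ∧
            e.getD 2 0 = v.getD 2 0 ∧ e.getD 3 0 = v.getD 3 0)) :
    PySem.List.slice v (some 0) (some 4) ≠ PySem.List.slice e (some 0) (some 4) := by
  rw [sl04_eq_take, sl04_eq_take]
  intro heq
  obtain ⟨he0, hv0, h⟩ := h
  by_cases h0 : e.getD 0 0 = v.getD 0 0
  · obtain ⟨he1, hv1, h⟩ := h h0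
    by_cases h1 : e.getD 1 0 = v.getD 1 0
    · obtain ⟨he2, hv2, h⟩ := h h1
      by_cases h2 : e.getD 2 0 = v.getD 2 0
      · obtain ⟨he3, hv3, -⟩ := h h2
        by_cases h3 : e.getD 3 0 = v.getD 3 0
        · exact hn ⟨h0, h1, h2, h3⟩
        · apply h3
          have := congrArg (fun l => l.getD 3 0) heq
          simpa [List.getD_eq_getElem?_getD, List.getElem?_take] using this.symm
      · apply h2
        have := congrArg (fun l => l.getD 2 0) heq
        simpa [List.getD_eq_getElem?_getD, List.getElem?_take] using this.symm
    · apply h1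
      have := congrArg (fun l => l.getD 1 0) heq
      simpa [List.getD_eq_getElem?_getD, List.getElem?_take] using this.symm
  · apply h0
    have := congrArg (fun l => l.getD 0 0) heq
    simpa [List.getD_eq_getElem?_getD, List.getElem?_take] using this.symm

-- B's dict lookup returns exactly the rows whose slice key equals entry's key, in order.
lemma groups_getD (e : List Int) (rows : List (List Int)) :
    (rows.foldl
      (fun d val => d.modify (PySem.List.slice val (some 0) (some 4)) [] (· ++ [val]))
      PySem.Dict.empty).getD (PySem.List.slice e (some 0) (some 4)) []
    = rows.filter (fun val => PySem.List.slice val (some 0) (some 4)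
        == PySem.List.slice e (some 0) (some 4)) := by
  have h := PySem.Dict.getD_foldl_modify_append
    (l := rows.map (fun v => (PySem.List.slice v (some 0) (some 4), v)))
    (d := PySem.Dict.empty) (c := PySem.List.slice e (some 0) (some 4))
  rw [List.foldl_map] at h
  rw [h, PySem.Dict.getD_empty, List.filter_map, List.map_map]
  simp [Function.comp_def]

-- Loop invariant: A's fold from any accumulator equals that accumulator extended by
-- the filter-and-map results.
lemma fold_eq (e : List Int) (rows : List (List Int)) (h : ∀ v ∈ rows, rowOK e v)
    (a b c : List (List Int)) :
    rows.foldl (fun acc val =>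
      if e.getD 0 0 = val.getD 0 0 ∧ e.getD 1 0 = val.getD 1 0 ∧
         e.getD 2 0 = val.getD 2 0 ∧ e.getD 3 0 = val.getD 3 0 then
        (acc.1 ++ [val],
         acc.2.1 ++ [[val.getD 4 0, val.getD 5 0, val.getD 6 0, val.getD 7 0]],
         acc.2.2 ++ [[val.getD 8 0, val.getD 9 0]])
      else acc) (a, b, c) =
    (a ++ rows.filter (fun val => PySem.List.slice val (some 0) (some 4) == PySem.List.slice e (some 0) (some 4)),
     b ++ (rows.filter (fun val => PySem.List.slice val (some 0) (some 4) == PySem.List.slice e (some 0) (some 4))).map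
            (fun val => PySem.List.slice val (some 4) (some 8)),
     c ++ (rows.filter (fun val => PySem.List.slice val (some 0) (some 4) == PySem.List.slice e (some 0) (some 4))).map
            (fun val => PySem.List.slice val (some 8) (some 10))) := by
  induction rows generalizing a b c with
  | nil => simp
  | cons v rest ih =>
    have hv : rowOK e v := h v (List.mem_cons_self ..)
    have hrest : ∀ w ∈ rest, rowOK e w := fun w hw => h w (List.mem_cons_of_mem _ hw)
    by_cases hc : e.getD 0 0 = v.getD 0 0 ∧ e.getD 1 0 = v.getD 1 0 ∧
                  e.getD 2 0 = v.getD 2 0 ∧ e.getD 3 0 = v.getD 3 0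
    · obtain ⟨hkey, hw, hd⟩ := row_match e v hv hc.1 hc.2.1 hc.2.2.1 hc.2.2.2
      simp only [List.foldl_cons, if_pos hc, ih hrest, List.filter_cons,
        beq_iff_eq, hkey]
      simp [hw, hd]
    · have hkey := row_nomatch e v hv hc
      simp only [List.foldl_cons, if_neg hc, ih hrest, List.filter_cons, beq_iff_eq,
        if_neg hkey]

-- ===== VERDICT (by name: the statement is the Claim_ definition above) =====
theorem search_spec : Claim_equal_search := by
  intro entry X_train _ hpre
  show search entry X_train = search_alt entry X_train
  unfold search search_alt
  simp only [groups_getD]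
  simpa using fold_eq entry X_train hpre [] [] []
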